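-- pv_equiv track=rewrite | github.com/yunjuka/test_solution | 프로그래머스/코딩 기초 트레이닝/홀짝에 따라 다른 값 변환하기.py | solution
-- ===== SOURCE A (Python) =====
-- def solution(n):
--     answer = 0
--     if n % 2 == 0 :
--         for i in range(1,n+1):
--             if i % 2 == 0:
--                 answer += i*i
--             else:
--                 answer = answer
--     else:
--         for i in range(1,n+1):
--             if i % 2 != 0:
--                 answer += i
--             else:
--                 answer = answer
--     return answer
-- ===== SOURCE B (Python) =====
-- def solution(n):
--     if n < 1:
--         return 0
--     if n % 2 == 0:
--         k = n // 2
--         return 2 * k * (k + 1) * (2 * k + 1) // 3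
--     k = (n + 1) // 2
--     return k * k
-- ===== Notes on version B (the rewrite author's own statement) =====
-- stated objective: faster
-- what changed: Replaced A's linear parity-filtered loops with constant-time closed-form arithmetic-series formulas, one per parity branch.
import Mathlib
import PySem

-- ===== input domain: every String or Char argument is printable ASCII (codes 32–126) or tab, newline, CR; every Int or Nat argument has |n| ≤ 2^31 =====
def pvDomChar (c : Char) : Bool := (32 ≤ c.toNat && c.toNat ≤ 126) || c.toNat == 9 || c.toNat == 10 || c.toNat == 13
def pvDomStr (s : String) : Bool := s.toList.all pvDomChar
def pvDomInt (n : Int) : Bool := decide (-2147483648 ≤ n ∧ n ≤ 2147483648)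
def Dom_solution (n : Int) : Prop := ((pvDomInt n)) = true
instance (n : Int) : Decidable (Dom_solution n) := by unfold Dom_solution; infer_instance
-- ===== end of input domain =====

-- B replaces A's O(n) parity loops with O(1) closed-form series formulas (objective: faster).

-- ===== PORT A =====
def solution (n : Int) : Int :=
  if PySem.Int.mod n 2 == 0 then
    (PySem.List.pyRange 1 (n + 1) 1).foldl
      (fun answer i => if PySem.Int.mod i 2 == 0 then answer + i * i else answer) 0
  else
    (PySem.List.pyRange 1 (n + 1) 1).foldl
      (fun answer i => if PySem.Int.mod i 2 != 0 then answer + i else answer) 0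

-- ===== PORT B =====
def solution_alt (n : Int) : Int :=
  if n < 1 then 0
  else if PySem.Int.mod n 2 == 0 then
    let k := PySem.Int.floordiv n 2
    PySem.Int.floordiv (2 * k * (k + 1) * (2 * k + 1)) 3
  else
    let k := PySem.Int.floordiv (n + 1) 2
    k * k

-- ===== PRECONDITION & SPEC =====
def Spec_solution (n : Int) (out : Int) : Prop := out = solution_alt n
instance (n : Int) (out : Int) : Decidable (Spec_solution n out) := by unfold Spec_solution; infer_instance

-- ===== CLAIM (what is proved, stated in full; the proofs are below) =====
def Claim_equal_solution : Prop := ∀ (n : Int), Dom_solution n → Spec_solution n (solution n)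

-- ===== LEMMAS AND PROOFS =====

-- A's even-branch loop over 1..2t, tripled (to avoid division): 3 * Σ (2j)² = 2t(t+1)(2t+1)
lemma loopE (t : Nat) :
    ((PySem.List.pyRange 1 (2 * (t : Int) + 1) 1).foldl
      (fun answer i => if PySem.Int.mod i 2 == 0 then answer + i * i else answer) 0) * 3
    = 2 * t * (t + 1) * (2 * t + 1) := by
  induction t with
  | zero => simp [PySem.Int.mod]
  | succ t ih =>
    have h1 : (2 * ((t : Int) + 1) + 1) = (2 * (t : Int) + 1) + 1 + 1 := by ring
    have e1 : PySem.List.pyRange 1 (2 * (t : Int) + 1 + 1) 1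
        = PySem.List.pyRange 1 (2 * (t : Int) + 1) 1 ++ [2 * (t : Int) + 1] :=
      PySem.List.pyRange_one_succ_right (by omega)
    have e2 : PySem.List.pyRange 1 (2 * (t : Int) + 1 + 1 + 1) 1
        = PySem.List.pyRange 1 (2 * (t : Int) + 1 + 1) 1 ++ [2 * (t : Int) + 1 + 1] :=
      PySem.List.pyRange_one_succ_right (by omega)
    push_cast
    rw [h1, e2, e1]
    have hodd : PySem.Int.mod (2 * (t : Int) + 1) 2 = 1 := by
      rw [PySem.Int.mod_eq_emod_of_pos (by omega)]; omega
    have heven : PySem.Int.mod (2 * (t : Int) + 1 + 1) 2 = 0 := by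
      rw [PySem.Int.mod_eq_emod_of_pos (by omega)]; omega
    simp only [List.foldl_append, List.foldl_cons, List.foldl_nil, hodd, heven,
      show ((1:Int) == 0) = false by decide, show ((0:Int) == 0) = true by decide,
      Bool.false_eq_true, if_false, if_true]
    nlinarith [ih]

-- A's odd-branch loop over 1..2t+1: Σ odd = (t+1)²
lemma loopO (t : Nat) :
    (PySem.List.pyRange 1 (2 * (t : Int) + 2) 1).foldl
      (fun answer i => if PySem.Int.mod i 2 != 0 then answer + i else answer) 0
    = ((t : Int) + 1) * ((t : Int) + 1) := by
  induction t with
  | zero =>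
    have : PySem.List.pyRange 1 (2 : Int) 1 = [1] := PySem.List.pyRange_one_singleton 1
    simp [this, PySem.Int.mod, Int.fmod]
  | succ t ih =>
    have e1 : PySem.List.pyRange 1 (2 * (t : Int) + 2 + 1) 1
        = PySem.List.pyRange 1 (2 * (t : Int) + 2) 1 ++ [2 * (t : Int) + 2] :=
      PySem.List.pyRange_one_succ_right (by omega)
    have e2 : PySem.List.pyRange 1 (2 * (t : Int) + 2 + 1 + 1) 1
        = PySem.List.pyRange 1 (2 * (t : Int) + 2 + 1) 1 ++ [2 * (t : Int) + 2 + 1] :=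
      PySem.List.pyRange_one_succ_right (by omega)
    have h1 : (2 * ((t : Int) + 1) + 2) = (2 * (t : Int) + 2) + 1 + 1 := by ring
    have heven : PySem.Int.mod (2 * (t : Int) + 2) 2 = 0 := by
      rw [PySem.Int.mod_eq_emod_of_pos (by omega)]; omega
    have hodd : PySem.Int.mod (2 * (t : Int) + 2 + 1) 2 = 1 := by
      rw [PySem.Int.mod_eq_emod_of_pos (by omega)]; omega
    push_cast
    rw [h1, e2, e1]
    simp only [List.foldl_append, List.foldl_cons, List.foldl_nil, heven, hodd,
      show ((0:Int) != 0) = false by decide, show ((1:Int) != 0) = true by decide,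
      Bool.false_eq_true, if_false, if_true]
    rw [ih]
    ring

-- ===== VERDICT (by name: the statement is the Claim_ definition above) =====
theorem solution_spec : Claim_equal_solution := by
  intro n _
  unfold Spec_solution solution solution_alt
  by_cases hlt : n < 1
  · have hnil : PySem.List.pyRange 1 (n + 1) 1 = [] :=
      PySem.List.pyRange_one_eq_nil (by omega)
    simp [hnil, hlt]
  · rw [not_lt] at hlt
    simp only [if_neg (by omega : ¬ n < 1)]
    have hm : PySem.Int.mod n 2 = n % 2 := PySem.Int.mod_eq_emod_of_pos (by omega)
    by_cases hpar : n % 2 = 0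
    · -- n even, n ≥ 2 : n = 2t
      obtain ⟨t, ht⟩ : ∃ t : Nat, n = 2 * (t : Int) := by
        refine ⟨(n / 2).toNat, ?_⟩; omega
      have hS := loopE t
      simp only [ht]
      have hk : PySem.Int.floordiv (2 * (t : Int)) 2 = (t : Int) := by
        rw [PySem.Int.floordiv_eq_ediv_of_pos (by omega)]; omega
      rw [hk]
      have h3 : 2 * (t : Int) * (t + 1) * (2 * t + 1)
          = 3 * ((PySem.List.pyRange 1 (2 * (t : Int) + 1) 1).foldl
              (fun answer i => if PySem.Int.mod i 2 == 0 then answer + i * i else answer) 0) := by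
        linarith [hS]
      rw [h3, PySem.Int.floordiv_eq_ediv_of_pos (by omega : (0:Int) < 3),
        Int.mul_ediv_cancel_left _ (by omega : (3:Int) ≠ 0)]
      norm_num
    · -- n odd, n ≥ 1 : n = 2t + 1
      obtain ⟨t, ht⟩ : ∃ t : Nat, n = 2 * (t : Int) + 1 := by
        refine ⟨(n / 2).toNat, ?_⟩; omega
      have hc : (PySem.Int.mod (2 * (t : Int) + 1) 2 == 0) = false := by
        have h1 : (2 * (t : Int) + 1) % 2 = 1 := by omega
        rw [PySem.Int.mod_eq_emod_of_pos (by omega), h1]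
        decide
      have h2 : (2 * (t : Int) + 1 + 1) = 2 * (t : Int) + 2 := by ring
      have hk : PySem.Int.floordiv (2 * (t : Int) + 2) 2 = (t : Int) + 1 := by
        rw [PySem.Int.floordiv_eq_ediv_of_pos (by omega)]; omega
      rw [ht, h2]
      simp only [hc, Bool.false_eq_true, if_false]
      rw [hk]
      exact loopO t
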